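-- pv_equiv track=rewrite | github.com/wtriddle/IFG | dataManipulators.py | createFGDataDict
-- ===== SOURCE A (Python) =====
-- def createFGDataDict(dataList):
-- 	dict = {}
-- 	for group in dataList:
-- 		keys = []
-- 		for key in dict.keys():
-- 			keys.append(key)
-- 		if group[0] not in keys:
-- 			dict.update({group[0] : 1})
-- 		else:
-- 			dict[group[0]] += 1
-- 		del(keys) # Delete the data after usage to prevent potential data leaks
-- 	return dict
-- ===== SOURCE B (Python) =====
-- def createFGDataDict(dataList):
--     firsts = [group[0] for group in dataList]
--     return {x: firsts.count(x) for x in firsts}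
-- ===== Notes on version B (the rewrite author's own statement) =====
-- stated objective: simpler
-- what changed: Replaces A's fused incremental loop (per-iteration copy of dict.keys(), membership test, insert-1-or-increment) by a two-phase shape: first project the list of first elements, then build the dict in one count-comprehension over that list.
import Mathlib
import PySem

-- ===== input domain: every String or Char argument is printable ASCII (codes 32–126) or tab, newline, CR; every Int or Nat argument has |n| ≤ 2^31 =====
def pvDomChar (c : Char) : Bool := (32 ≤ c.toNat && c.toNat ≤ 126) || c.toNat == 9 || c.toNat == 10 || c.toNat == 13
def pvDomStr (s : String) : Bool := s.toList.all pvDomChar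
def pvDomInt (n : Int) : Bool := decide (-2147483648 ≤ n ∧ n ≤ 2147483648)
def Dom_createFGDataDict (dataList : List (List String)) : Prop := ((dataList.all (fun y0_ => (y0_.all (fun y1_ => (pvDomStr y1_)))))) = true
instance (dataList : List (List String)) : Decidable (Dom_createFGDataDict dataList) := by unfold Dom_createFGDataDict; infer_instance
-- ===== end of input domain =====

-- B replaces A's fused keys-copy/increment loop by a projection pass (the list of first
-- elements) followed by a count-comprehension pass; objective: simpler.


-- ===== PORT A =====
-- A: for group in dataList: copy dict.keys() into `keys`; if group[0] not in keys insert 1 else increment.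
-- group[0] is ported as pyGetD group 0 "" — total form, exact under Pre_ (no empty group).
def createFGDataDict (dataList : List (List String)) : List (String × Int) :=
  (dataList.foldl
    (fun d group =>
      let keys := d.keys
      let k := PySem.List.pyGetD group 0 ""
      if k ∈ keys then d.modify k 0 (· + 1) else d.insert k 1)
    PySem.Dict.empty).items

-- ===== PORT B =====
-- B: firsts = [group[0] for group in dataList]; {x: firsts.count(x) for x in firsts}
def createFGDataDict_alt (dataList : List (List String)) : List (String × Int) :=
  let firsts := dataList.map (fun group => PySem.List.pyGetD group 0 "")
  (firsts.foldl (fun d x => d.insert x ((firsts.count x : Int))) PySem.Dict.empty).items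

-- ===== PRECONDITION & SPEC =====
-- Pre_ excludes any empty group: Python A raises IndexError on group[0] there (B does too).
def Pre_createFGDataDict (dataList : List (List String)) : Prop := ∀ g ∈ dataList, g ≠ []
instance (dataList : List (List String)) : Decidable (Pre_createFGDataDict dataList) := by unfold Pre_createFGDataDict; infer_instance

def pvWitness_createFGDataDict : List (List String) := [["a", "x"], ["b"], ["a"]]

def Spec_createFGDataDict (dataList : List (List String)) (out : List (String × Int)) : Prop := out = createFGDataDict_alt dataList
instance (dataList : List (List String)) (out : List (String × Int)) : Decidable (Spec_createFGDataDict dataList out) := by unfold Spec_createFGDataDict; infer_instance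

-- ===== CLAIM (what is proved, stated in full; the proofs are below) =====
def Claim_equal_createFGDataDict : Prop := ∀ (dataList : List (List String)), Dom_createFGDataDict dataList → Pre_createFGDataDict dataList → Spec_createFGDataDict dataList (createFGDataDict dataList)

-- ===== LEMMAS AND PROOFS =====

-- A's loop body is exactly the Counter step: membership test + insert-1/increment = modify with default 0.
lemma stepA_eq_modify (d : PySem.Dict String Int) (k : String) :
    (if k ∈ d.keys then d.modify k 0 (· + 1) else d.insert k 1) = d.modify k 0 (· + 1) := by
  split_ifs with h
  · rfl
  · have hc : d.contains k = false := by
      rw [← Bool.not_eq_true, PySem.Dict.contains_iff_mem_keys]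
      exact h
    rw [PySem.Dict.modify, PySem.Dict.getD_of_not_contains d 0 hc]
    norm_num

-- A's dict is Counter(firsts).
lemma dictA_eq_counter (dataList : List (List String)) :
    dataList.foldl
      (fun d group =>
        let keys := d.keys
        let k := PySem.List.pyGetD group 0 ""
        if k ∈ keys then d.modify k 0 (· + 1) else d.insert k 1)
      PySem.Dict.empty
    = PySem.Dict.counter (dataList.map (fun group => PySem.List.pyGetD group 0 "")) := by
  rw [PySem.Dict.counter_eq_foldl, List.foldl_map]
  exact PySem.List.foldl_congr_mem _ _ _ _ (fun acc x _ => stepA_eq_modify acc _)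

-- getD of B's constant-per-key insert loop.
lemma getD_foldl_insert_const (v : String → Int) (l : List String) (d : PySem.Dict String Int) (k : String) :
    (l.foldl (fun d x => d.insert x (v x)) d).getD k 0 = if k ∈ l then v k else d.getD k 0 := by
  induction l generalizing d with
  | nil => simp
  | cons x l ih =>
    simp only [List.foldl_cons, ih, PySem.Dict.getD_insert, List.mem_cons]
    by_cases hk : k ∈ l <;> by_cases hx : k = x <;> simp [hk, hx]

theorem createFGDataDict_spec_aux (dataList : List (List String)) :
    createFGDataDict dataList = createFGDataDict_alt dataList := by
  unfold createFGDataDict createFGDataDict_alt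
  set firsts := dataList.map (fun group => PySem.List.pyGetD group 0 "") with hf
  rw [dictA_eq_counter, PySem.Dict.items_counter]
  set dB := firsts.foldl (fun d x => d.insert x ((firsts.count x : Int))) PySem.Dict.empty with hB
  have hkeys : dB.keys = PySem.Set.ofList firsts := by
    rw [hB, PySem.Dict.keys_foldl_insert]
    simp [PySem.Set.update_nil_left, PySem.Dict.keys_empty]
  have hnd : dB.keys.Nodup := by rw [hkeys]; exact PySem.Set.nodup_ofList firsts
  rw [PySem.Dict.items_eq_map_keys dB hnd 0, hkeys]
  apply List.map_congr_left
  intro k hk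
  have hmem : k ∈ firsts := (PySem.Set.mem_ofList _ _).1 hk
  rw [hB, getD_foldl_insert_const]
  simp only [hf] at hmem ⊢
  simp [hmem]

-- ===== VERDICT (by name: the statement is the Claim_ definition above) =====
theorem createFGDataDict_spec : Claim_equal_createFGDataDict := by
  intro dataList _ _
  unfold Spec_createFGDataDict
  exact createFGDataDict_spec_aux dataList
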